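-- pv_equiv track=rewrite | github.com/bfalkowski2021/QReviewer | qrev/diff.py | infer_language
-- ===== SOURCE A (Python) =====
-- from typing import List, Optional, Tuple
--
-- def infer_language(file_path: str) -> Optional[str]:
--     """Infer programming language from file extension."""
--     extension_map = {
--         # Common web languages
--         '.js': 'javascript', '.jsx': 'javascript', '.ts': 'typescript', '.tsx': 'typescript',
--         '.html': 'html', '.htm': 'html', '.css': 'css', '.scss': 'scss', '.sass': 'sass',
--
--         # Python
--         '.py': 'python', '.pyi': 'python',
--
--         # Java
--         '.java': 'java', '.kt': 'kotlin',
--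
--         # C-family
--         '.c': 'c', '.cpp': 'cpp', '.cc': 'cpp', '.cxx': 'cpp', '.h': 'c', '.hpp': 'cpp',
--
--         # Go
--         '.go': 'go',
--
--         # Rust
--         '.rs': 'rust',
--
--         # Ruby
--         '.rb': 'ruby',
--
--         # PHP
--         '.php': 'php',
--
--         # Shell
--         '.sh': 'bash', '.bash': 'bash', '.zsh': 'bash',
--
--         # Configuration
--         '.yaml': 'yaml', '.yml': 'yaml', '.json': 'json', '.toml': 'toml', '.ini': 'ini',
--         '.cfg': 'ini', '.conf': 'ini',
--
--         # Documentation
--         '.md': 'markdown', '.rst': 'rst', '.txt': 'text'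
--     }
--
--     for ext, lang in extension_map.items():
--         if file_path.lower().endswith(ext):
--             return lang
--
--     return None
-- ===== SOURCE B (Python) =====
-- # B: extract the (lowercased) extension after the last dot once, then find the
-- # language whose extension group contains it (inverted lang -> extensions table).
-- LANG_EXTS = [
--     ('javascript', ('js', 'jsx')),
--     ('typescript', ('ts', 'tsx')),
--     ('html', ('html', 'htm')),
--     ('css', ('css',)),
--     ('scss', ('scss',)),
--     ('sass', ('sass',)),
--     ('python', ('py', 'pyi')),
--     ('java', ('java',)),
--     ('kotlin', ('kt',)),
--     ('c', ('c', 'h')),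
--     ('cpp', ('cpp', 'cc', 'cxx', 'hpp')),
--     ('go', ('go',)),
--     ('rust', ('rs',)),
--     ('ruby', ('rb',)),
--     ('php', ('php',)),
--     ('bash', ('sh', 'bash', 'zsh')),
--     ('yaml', ('yaml', 'yml')),
--     ('json', ('json',)),
--     ('toml', ('toml',)),
--     ('ini', ('ini', 'cfg', 'conf')),
--     ('markdown', ('md',)),
--     ('rst', ('rst',)),
--     ('text', ('txt',)),
-- ]
--
-- def infer_language(file_path):
--     """Infer programming language from file extension."""
--     lowered = file_path.lower()
--     if '.' not in lowered:
--         return None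
--     ext = lowered.rsplit('.', 1)[1]
--     for lang, exts in LANG_EXTS:
--         if ext in exts:
--             return lang
--     return None
-- ===== Notes on version B (the rewrite author's own statement) =====
-- stated objective: faster
-- what changed: Instead of scanning 36 endswith-suffix tests (each one re-lowercasing the whole path), B lowercases once, extracts the substring after the last dot once, and scans a small inverted language->extension-group table for an equality match.
import Mathlib
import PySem

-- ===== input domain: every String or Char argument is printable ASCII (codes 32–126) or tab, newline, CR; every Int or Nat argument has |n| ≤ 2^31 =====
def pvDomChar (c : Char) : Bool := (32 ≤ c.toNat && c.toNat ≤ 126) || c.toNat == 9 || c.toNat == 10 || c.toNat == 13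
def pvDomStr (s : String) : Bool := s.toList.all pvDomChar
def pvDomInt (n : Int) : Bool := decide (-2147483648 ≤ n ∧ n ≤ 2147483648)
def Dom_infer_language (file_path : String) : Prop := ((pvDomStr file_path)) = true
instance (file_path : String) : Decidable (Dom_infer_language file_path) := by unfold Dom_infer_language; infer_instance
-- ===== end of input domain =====

-- B replaces A's 36-way endswith scan with one last-dot extension extraction and a scan of an
-- inverted language -> extension-group table (lowercases and scans the path once, not 36 times).


-- ===== PORT A =====
-- A's extension_map dict, as the ordered pair list its loop iterates over
def extPairs : List (String × String) :=
  [(".js", "javascript"), (".jsx", "javascript"), (".ts", "typescript"), (".tsx", "typescript"),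
   (".html", "html"), (".htm", "html"), (".css", "css"), (".scss", "scss"), (".sass", "sass"),
   (".py", "python"), (".pyi", "python"),
   (".java", "java"), (".kt", "kotlin"),
   (".c", "c"), (".cpp", "cpp"), (".cc", "cpp"), (".cxx", "cpp"), (".h", "c"), (".hpp", "cpp"),
   (".go", "go"), (".rs", "rust"), (".rb", "ruby"), (".php", "php"),
   (".sh", "bash"), (".bash", "bash"), (".zsh", "bash"),
   (".yaml", "yaml"), (".yml", "yaml"), (".json", "json"), (".toml", "toml"), (".ini", "ini"),
   (".cfg", "ini"), (".conf", "ini"),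
   (".md", "markdown"), (".rst", "rst"), (".txt", "text")]

-- 'for ext, lang in extension_map.items(): if file_path.lower().endswith(ext): return lang'
def inferLoopA : List (String × String) → String → Option String
  | [], _ => none
  | (ext, lang) :: rest, fp =>
    if PySem.Str.endswith (PySem.Str.lower fp) ext then some lang else inferLoopA rest fp

def infer_language (file_path : String) : Option String :=
  inferLoopA extPairs file_path

-- ===== PORT B =====
-- Source B's LANG_EXTS: each language with its (dotless) extension group
def langGroups : List (String × List String) :=
  [("javascript", ["js", "jsx"]),
   ("typescript", ["ts", "tsx"]),
   ("html", ["html", "htm"]),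
   ("css", ["css"]),
   ("scss", ["scss"]),
   ("sass", ["sass"]),
   ("python", ["py", "pyi"]),
   ("java", ["java"]),
   ("kotlin", ["kt"]),
   ("c", ["c", "h"]),
   ("cpp", ["cpp", "cc", "cxx", "hpp"]),
   ("go", ["go"]),
   ("rust", ["rs"]),
   ("ruby", ["rb"]),
   ("php", ["php"]),
   ("bash", ["sh", "bash", "zsh"]),
   ("yaml", ["yaml", "yml"]),
   ("json", ["json"]),
   ("toml", ["toml"]),
   ("ini", ["ini", "cfg", "conf"]),
   ("markdown", ["md"]),
   ("rst", ["rst"]),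
   ("text", ["txt"])]

-- 'for lang, exts in LANG_EXTS: if ext in exts: return lang'
def scanGroupsB : List (String × List String) → String → Option String
  | [], _ => none
  | (lang, exts) :: rest, e => if exts.contains e then some lang else scanGroupsB rest e

-- hand port of "'.' not in lowered" + "lowered.rsplit('.', 1)[1]" — exact: when a dot occurs,
-- the piece after the LAST dot is the reversed string's longest dot-free prefix, reversed back
def infer_language_alt (file_path : String) : Option String :=
  let l := (PySem.Str.lower file_path).toList
  if l.contains '.' then
    scanGroupsB langGroups (String.ofList ((l.reverse.takeWhile (· ≠ '.')).reverse))
  else none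

-- ===== PRECONDITION & SPEC =====
def Spec_infer_language (file_path : String) (out : Option String) : Prop := out = infer_language_alt file_path
instance (file_path : String) (out : Option String) : Decidable (Spec_infer_language file_path out) := by unfold Spec_infer_language; infer_instance

-- ===== CLAIM (what is proved, stated in full; the proofs are below) =====
def Claim_equal_infer_language : Prop := ∀ (file_path : String), Dom_infer_language file_path → Spec_infer_language file_path (infer_language file_path)

-- ===== LEMMAS AND PROOFS =====

-- proof-side view of the extension: '.' ++ (part after last dot), when a dot occurs
def lastExt? (l : List Char) : Option (List Char) :=
  if l.contains '.' then some ('.' :: (l.reverse.takeWhile (· ≠ '.')).reverse) else none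

-- proof-side association lookup over A's pair list (first key equal to e)
def findA : List (String × String) → List Char → Option String
  | [], _ => none
  | (ext, lang) :: rest, e => if ext.toList = e then some lang else findA rest e

lemma tw_all {t : List Char} (h : ('.' : Char) ∉ t) :
    t.takeWhile (· ≠ '.') = t := by
  rw [List.takeWhile_eq_self_iff]
  intro c hc
  simp only [ne_eq, decide_eq_true_eq]
  rintro rfl; exact h hc

-- a string ends with '.t' (no dot in t) exactly when '.t' is its last-dot extension
lemma ends_iff (l t : List Char) (h : ('.' : Char) ∉ t) :
    PySem.Chars.endswith l ('.' :: t) = true ↔ lastExt? l = some ('.' :: t) := by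
  rw [PySem.Chars.endswith_iff]
  constructor
  · rintro ⟨p, rfl⟩
    have hc : (p ++ '.' :: t).contains '.' = true := by simp
    have hrev : ('.' : Char) ∉ t.reverse := by simpa using h
    have hrw : (p ++ '.' :: t).reverse = t.reverse ++ '.' :: p.reverse := by simp
    simp only [lastExt?, hc, if_pos]
    rw [hrw, List.takeWhile_append, if_pos (by rw [tw_all hrev])]
    simp
  · intro hx
    simp only [lastExt?] at hx
    split_ifs at hx with hc
    have he := Option.some.inj hx
    have hd : ('.' : Char) ∈ l.reverse := by simpa using hc
    have hdw : l.reverse.dropWhile (· ≠ '.') ≠ [] := by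
      intro hnil
      rw [List.dropWhile_eq_nil_iff] at hnil
      have := hnil _ hd
      simp at this
    obtain ⟨x, r, hxr⟩ := List.exists_cons_of_ne_nil hdw
    have hx0 : x = '.' := by
      have h1 := List.head_dropWhile_not (fun c => decide (c ≠ '.')) hdw
      have h2 : (l.reverse.dropWhile (fun c => decide (c ≠ '.'))).head hdw = x := by
        simp only [hxr, List.head_cons]
      rw [h2] at h1; simpa using h1
    subst hx0
    have hsplit : l.reverse.takeWhile (· ≠ '.') ++ '.' :: r = l.reverse := by
      rw [← hxr]; exact List.takeWhile_append_dropWhile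
    refine ⟨r.reverse, ?_⟩
    have hcons : ('.' :: t) = ('.' :: (l.reverse.takeWhile (· ≠ '.')).reverse) := he.symm
    rw [hcons]
    symm
    simpa using (congrArg List.reverse hsplit).symm

-- A's endswith scan over any key list of shape '.t' ('.'∉t) = extension extraction + assoc lookup
lemma loop_eq (fp : String) : ∀ (L : List (String × String)),
    (∀ p ∈ L, p.1.toList.take 1 = ['.'] ∧ ('.' : Char) ∉ p.1.toList.drop 1) →
    inferLoopA L fp =
      match lastExt? (PySem.Str.lower fp).toList with
      | none => none
      | some e => findA L e
  | [], _ => by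
      cases hx : lastExt? (PySem.Str.lower fp).toList <;> simp [inferLoopA, findA]
  | (ext, lang) :: rest, hok => by
      obtain ⟨h1, h2⟩ := hok (ext, lang) List.mem_cons_self
      have hext : ext.toList = '.' :: ext.toList.drop 1 := by
        cases hL : ext.toList with
        | nil => simp [hL] at h1
        | cons a as =>
          rw [hL] at h1
          simp at h1 ⊢
          simpa using h1
      have hdot : ('.' : Char) ∉ ext.toList.drop 1 := h2
      have hIH := loop_eq fp rest (fun p hp => hok p (List.mem_cons_of_mem _ hp))
      cases hx : lastExt? (PySem.Str.lower fp).toList with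
      | none =>
        have hf : PySem.Str.endswith (PySem.Str.lower fp) ext = false := by
          apply Bool.eq_false_iff.mpr
          intro htr
          rw [PySem.Str.endswith_eq, hext] at htr
          have := (ends_iff _ _ hdot).mp htr
          rw [hx] at this; cases this
        simp only [inferLoopA, hf, Bool.false_eq_true, if_false]
        rw [hIH, hx]
      | some e =>
        by_cases he : ext.toList = e
        · have ht : PySem.Str.endswith (PySem.Str.lower fp) ext = true := by
            rw [PySem.Str.endswith_eq, hext]
            exact (ends_iff _ _ hdot).mpr (by rw [← hext, he, hx])
          simp only [inferLoopA, ht, if_true]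
          simp [findA, he]
        · have hf : PySem.Str.endswith (PySem.Str.lower fp) ext = false := by
            apply Bool.eq_false_iff.mpr
            intro htr
            rw [PySem.Str.endswith_eq, hext] at htr
            have := (ends_iff _ _ hdot).mp htr
            rw [hx, ← hext] at this
            exact he (Option.some.inj this).symm
          simp only [inferLoopA, hf, Bool.false_eq_true, if_false]
          rw [hIH, hx]
          simp [findA, he]

-- the two literal tables agree: assoc lookup of '.t' in extPairs = group scan of t in langGroups
lemma tables_eq (t : List Char) :
    findA extPairs ('.' :: t) = scanGroupsB langGroups (String.ofList t) := by
  by_cases h0 : t = "js".toList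
  · subst h0; decide
  by_cases h1 : t = "jsx".toList
  · subst h1; decide
  by_cases h2 : t = "ts".toList
  · subst h2; decide
  by_cases h3 : t = "tsx".toList
  · subst h3; decide
  by_cases h4 : t = "html".toList
  · subst h4; decide
  by_cases h5 : t = "htm".toList
  · subst h5; decide
  by_cases h6 : t = "css".toList
  · subst h6; decide
  by_cases h7 : t = "scss".toList
  · subst h7; decide
  by_cases h8 : t = "sass".toList
  · subst h8; decide
  by_cases h9 : t = "py".toList
  · subst h9; decide
  by_cases h10 : t = "pyi".toList
  · subst h10; decide
  by_cases h11 : t = "java".toList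
  · subst h11; decide
  by_cases h12 : t = "kt".toList
  · subst h12; decide
  by_cases h13 : t = "c".toList
  · subst h13; decide
  by_cases h14 : t = "cpp".toList
  · subst h14; decide
  by_cases h15 : t = "cc".toList
  · subst h15; decide
  by_cases h16 : t = "cxx".toList
  · subst h16; decide
  by_cases h17 : t = "h".toList
  · subst h17; decide
  by_cases h18 : t = "hpp".toList
  · subst h18; decide
  by_cases h19 : t = "go".toList
  · subst h19; decide
  by_cases h20 : t = "rs".toList
  · subst h20; decide
  by_cases h21 : t = "rb".toList
  · subst h21; decide
  by_cases h22 : t = "php".toList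
  · subst h22; decide
  by_cases h23 : t = "sh".toList
  · subst h23; decide
  by_cases h24 : t = "bash".toList
  · subst h24; decide
  by_cases h25 : t = "zsh".toList
  · subst h25; decide
  by_cases h26 : t = "yaml".toList
  · subst h26; decide
  by_cases h27 : t = "yml".toList
  · subst h27; decide
  by_cases h28 : t = "json".toList
  · subst h28; decide
  by_cases h29 : t = "toml".toList
  · subst h29; decide
  by_cases h30 : t = "ini".toList
  · subst h30; decide
  by_cases h31 : t = "cfg".toList
  · subst h31; decide
  by_cases h32 : t = "conf".toList
  · subst h32; decide
  by_cases h33 : t = "md".toList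
  · subst h33; decide
  by_cases h34 : t = "rst".toList
  · subst h34; decide
  by_cases h35 : t = "txt".toList
  · subst h35; decide
  have g0 : ¬ ((['j', 's'] : List Char) = t) := fun he => h0 he.symm
  have g1 : ¬ ((['j', 's', 'x'] : List Char) = t) := fun he => h1 he.symm
  have g2 : ¬ ((['t', 's'] : List Char) = t) := fun he => h2 he.symm
  have g3 : ¬ ((['t', 's', 'x'] : List Char) = t) := fun he => h3 he.symm
  have g4 : ¬ ((['h', 't', 'm', 'l'] : List Char) = t) := fun he => h4 he.symm
  have g5 : ¬ ((['h', 't', 'm'] : List Char) = t) := fun he => h5 he.symm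
  have g6 : ¬ ((['c', 's', 's'] : List Char) = t) := fun he => h6 he.symm
  have g7 : ¬ ((['s', 'c', 's', 's'] : List Char) = t) := fun he => h7 he.symm
  have g8 : ¬ ((['s', 'a', 's', 's'] : List Char) = t) := fun he => h8 he.symm
  have g9 : ¬ ((['p', 'y'] : List Char) = t) := fun he => h9 he.symm
  have g10 : ¬ ((['p', 'y', 'i'] : List Char) = t) := fun he => h10 he.symm
  have g11 : ¬ ((['j', 'a', 'v', 'a'] : List Char) = t) := fun he => h11 he.symm
  have g12 : ¬ ((['k', 't'] : List Char) = t) := fun he => h12 he.symm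
  have g13 : ¬ ((['c'] : List Char) = t) := fun he => h13 he.symm
  have g14 : ¬ ((['c', 'p', 'p'] : List Char) = t) := fun he => h14 he.symm
  have g15 : ¬ ((['c', 'c'] : List Char) = t) := fun he => h15 he.symm
  have g16 : ¬ ((['c', 'x', 'x'] : List Char) = t) := fun he => h16 he.symm
  have g17 : ¬ ((['h'] : List Char) = t) := fun he => h17 he.symm
  have g18 : ¬ ((['h', 'p', 'p'] : List Char) = t) := fun he => h18 he.symm
  have g19 : ¬ ((['g', 'o'] : List Char) = t) := fun he => h19 he.symm
  have g20 : ¬ ((['r', 's'] : List Char) = t) := fun he => h20 he.symm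
  have g21 : ¬ ((['r', 'b'] : List Char) = t) := fun he => h21 he.symm
  have g22 : ¬ ((['p', 'h', 'p'] : List Char) = t) := fun he => h22 he.symm
  have g23 : ¬ ((['s', 'h'] : List Char) = t) := fun he => h23 he.symm
  have g24 : ¬ ((['b', 'a', 's', 'h'] : List Char) = t) := fun he => h24 he.symm
  have g25 : ¬ ((['z', 's', 'h'] : List Char) = t) := fun he => h25 he.symm
  have g26 : ¬ ((['y', 'a', 'm', 'l'] : List Char) = t) := fun he => h26 he.symm
  have g27 : ¬ ((['y', 'm', 'l'] : List Char) = t) := fun he => h27 he.symm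
  have g28 : ¬ ((['j', 's', 'o', 'n'] : List Char) = t) := fun he => h28 he.symm
  have g29 : ¬ ((['t', 'o', 'm', 'l'] : List Char) = t) := fun he => h29 he.symm
  have g30 : ¬ ((['i', 'n', 'i'] : List Char) = t) := fun he => h30 he.symm
  have g31 : ¬ ((['c', 'f', 'g'] : List Char) = t) := fun he => h31 he.symm
  have g32 : ¬ ((['c', 'o', 'n', 'f'] : List Char) = t) := fun he => h32 he.symm
  have g33 : ¬ ((['m', 'd'] : List Char) = t) := fun he => h33 he.symm
  have g34 : ¬ ((['r', 's', 't'] : List Char) = t) := fun he => h34 he.symm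
  have g35 : ¬ ((['t', 'x', 't'] : List Char) = t) := fun he => h35 he.symm
  have f0 : ¬ (t = (['j', 's'] : List Char)) := h0
  have f1 : ¬ (t = (['j', 's', 'x'] : List Char)) := h1
  have f2 : ¬ (t = (['t', 's'] : List Char)) := h2
  have f3 : ¬ (t = (['t', 's', 'x'] : List Char)) := h3
  have f4 : ¬ (t = (['h', 't', 'm', 'l'] : List Char)) := h4
  have f5 : ¬ (t = (['h', 't', 'm'] : List Char)) := h5
  have f6 : ¬ (t = (['c', 's', 's'] : List Char)) := h6
  have f7 : ¬ (t = (['s', 'c', 's', 's'] : List Char)) := h7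
  have f8 : ¬ (t = (['s', 'a', 's', 's'] : List Char)) := h8
  have f9 : ¬ (t = (['p', 'y'] : List Char)) := h9
  have f10 : ¬ (t = (['p', 'y', 'i'] : List Char)) := h10
  have f11 : ¬ (t = (['j', 'a', 'v', 'a'] : List Char)) := h11
  have f12 : ¬ (t = (['k', 't'] : List Char)) := h12
  have f13 : ¬ (t = (['c'] : List Char)) := h13
  have f14 : ¬ (t = (['c', 'p', 'p'] : List Char)) := h14
  have f15 : ¬ (t = (['c', 'c'] : List Char)) := h15
  have f16 : ¬ (t = (['c', 'x', 'x'] : List Char)) := h16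
  have f17 : ¬ (t = (['h'] : List Char)) := h17
  have f18 : ¬ (t = (['h', 'p', 'p'] : List Char)) := h18
  have f19 : ¬ (t = (['g', 'o'] : List Char)) := h19
  have f20 : ¬ (t = (['r', 's'] : List Char)) := h20
  have f21 : ¬ (t = (['r', 'b'] : List Char)) := h21
  have f22 : ¬ (t = (['p', 'h', 'p'] : List Char)) := h22
  have f23 : ¬ (t = (['s', 'h'] : List Char)) := h23
  have f24 : ¬ (t = (['b', 'a', 's', 'h'] : List Char)) := h24
  have f25 : ¬ (t = (['z', 's', 'h'] : List Char)) := h25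
  have f26 : ¬ (t = (['y', 'a', 'm', 'l'] : List Char)) := h26
  have f27 : ¬ (t = (['y', 'm', 'l'] : List Char)) := h27
  have f28 : ¬ (t = (['j', 's', 'o', 'n'] : List Char)) := h28
  have f29 : ¬ (t = (['t', 'o', 'm', 'l'] : List Char)) := h29
  have f30 : ¬ (t = (['i', 'n', 'i'] : List Char)) := h30
  have f31 : ¬ (t = (['c', 'f', 'g'] : List Char)) := h31
  have f32 : ¬ (t = (['c', 'o', 'n', 'f'] : List Char)) := h32
  have f33 : ¬ (t = (['m', 'd'] : List Char)) := h33
  have f34 : ¬ (t = (['r', 's', 't'] : List Char)) := h34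
  have f35 : ¬ (t = (['t', 'x', 't'] : List Char)) := h35
  simp [findA, extPairs, scanGroupsB, langGroups, String.ext_iff, String.toList_ofList,
    f0, f1, f2, f3, f4, f5, f6, f7, f8, f9, f10, f11, f12, f13, f14, f15, f16, f17, f18, f19, f20, f21, f22, f23, f24, f25, f26, f27, f28, f29, f30, f31, f32, f33, f34, f35,
    g0, g1, g2, g3, g4, g5, g6, g7, g8, g9, g10, g11, g12, g13, g14, g15, g16, g17, g18, g19, g20, g21, g22, g23, g24, g25, g26, g27, g28, g29, g30, g31, g32, g33, g34, g35]

-- ===== VERDICT (by name: the statement is the Claim_ definition above) =====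
theorem infer_language_spec : Claim_equal_infer_language := by
  intro fp _
  unfold Spec_infer_language infer_language infer_language_alt
  rw [loop_eq fp extPairs (by decide)]
  simp only [lastExt?]
  by_cases hc : ('.' : Char) ∈ PySem.Chars.lower fp.toList
  · simp only [PySem.Str.toList_lower, List.contains_eq_mem, hc, decide_true, if_true]
    exact tables_eq _
  · simp [hc]
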